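-- pv_equiv track=rewrite | github.com/MarshallEriksen-Neura/deeting_core | app/api/v1/external/gateway.py | _parse_provider_scopes
-- ===== SOURCE A (Python) =====
-- def _parse_provider_scopes(scopes: list[str] | None) -> tuple[set[str], set[str], set[str]]:
--     """解析 provider/preset/preset_item 范围，供路由与模型列表过滤。"""
--     providers: set[str] = set()
--     presets: set[str] = set()
--     preset_items: set[str] = set()
--     if not scopes:
--         return providers, presets, preset_items
--
--     for scope in scopes:
--         if not scope or ":" not in scope:
--             continue
--         scope_type, scope_value = scope.split(":", 1)
--         match scope_type:
--             case "provider":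
--                 providers.add(scope_value)
--             case "preset":
--                 presets.add(scope_value)
--             case "preset_item":
--                 preset_items.add(scope_value)
--     return providers, presets, preset_items
-- ===== SOURCE B (Python) =====
-- def _grab(seq, prefix):
--     return {s.split(":", 1)[1] for s in seq if s.startswith(prefix)}
--
--
-- def _parse_provider_scopes(scopes):
--     seq = scopes or ()
--     return _grab(seq, "provider:"), _grab(seq, "preset:"), _grab(seq, "preset_item:")
-- ===== Notes on version B (the rewrite author's own statement) =====
-- stated objective: idiomatic
-- what changed: Replaces the single dispatch loop with its match statement by three independent prefix-filtered set comprehensions, one per scope kind, each scanning the list and keeping everything after the first colon.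
import Mathlib
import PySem

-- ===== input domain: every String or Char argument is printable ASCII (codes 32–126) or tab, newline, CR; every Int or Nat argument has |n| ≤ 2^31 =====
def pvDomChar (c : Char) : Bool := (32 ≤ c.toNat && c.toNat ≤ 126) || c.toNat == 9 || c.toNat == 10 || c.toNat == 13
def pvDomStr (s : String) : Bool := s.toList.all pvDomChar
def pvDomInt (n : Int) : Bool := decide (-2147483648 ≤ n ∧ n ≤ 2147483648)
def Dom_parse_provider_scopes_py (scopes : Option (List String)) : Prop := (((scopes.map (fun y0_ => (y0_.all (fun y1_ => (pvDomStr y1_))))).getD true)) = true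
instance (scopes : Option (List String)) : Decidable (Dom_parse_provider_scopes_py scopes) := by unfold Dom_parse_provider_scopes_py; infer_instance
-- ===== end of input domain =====

-- B replaces A's single dispatch loop (match on the part before the first colon) by three
-- independent prefix-filtered set comprehensions, one per scope kind: an idiomatic decomposition.


-- ===== PORT A =====
-- one iteration of A's `for scope in scopes` loop over the state (providers, presets, preset_items)
def pvStepA (st : List String × List String × List String) (scope : String) :
    List String × List String × List String :=
  if scope = "" || !(PySem.Str.isIn ":" scope) then st
  else
    -- scope.split(":", 1); the tuple unpack cannot fail since ":" is in scope, so the two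
    -- pieces are read as parts[0] and parts[1] (sep ≠ "" so splitMax? is always `some`)
    let parts := (PySem.Str.splitMax? scope ":" 1).getD []
    let scope_type := PySem.List.pyGetD parts 0 ""
    let scope_value := PySem.List.pyGetD parts 1 ""
    if scope_type = "provider" then (PySem.Set.add st.1 scope_value, st.2.1, st.2.2)
    else if scope_type = "preset" then (st.1, PySem.Set.add st.2.1 scope_value, st.2.2)
    else if scope_type = "preset_item" then (st.1, st.2.1, PySem.Set.add st.2.2 scope_value)
    else st

def parse_provider_scopes_py (scopes : Option (List String)) :
    List String × List String × List String :=
  match scopes with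
  | none => ([], [], [])                    -- `if not scopes` (None)
  | some l =>
    if l = [] then ([], [], [])             -- `if not scopes` (empty list)
    else l.foldl pvStepA ([], [], [])

-- ===== PORT B =====
-- {s.split(":", 1)[1] for s in seq if s.startswith(prefix)}; the [1] cannot raise because
-- prefix itself contains ":", so it is read with default ""
def pvGrab (seq : List String) (pre : String) : List String :=
  PySem.Set.ofList ((seq.filter (fun s => PySem.Str.startswith s pre)).map
    (fun s => PySem.List.pyGetD ((PySem.Str.splitMax? s ":" 1).getD []) 1 ""))

def parse_provider_scopes_py_alt (scopes : Option (List String)) :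
    List String × List String × List String :=
  let seq := scopes.getD []                 -- `scopes or ()`
  (pvGrab seq "provider:", pvGrab seq "preset:", pvGrab seq "preset_item:")

-- ===== PRECONDITION & SPEC =====
def Spec_parse_provider_scopes_py (scopes : Option (List String)) (out : List String × List String × List String) : Prop := out = parse_provider_scopes_py_alt scopes
instance (scopes : Option (List String)) (out : List String × List String × List String) : Decidable (Spec_parse_provider_scopes_py scopes out) := by unfold Spec_parse_provider_scopes_py; infer_instance

-- ===== CLAIM (what is proved, stated in full; the proofs are below) =====
def Claim_equal_parse_provider_scopes_py : Prop := ∀ (scopes : Option (List String)), Dom_parse_provider_scopes_py scopes → Spec_parse_provider_scopes_py scopes (parse_provider_scopes_py scopes)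

-- ===== LEMMAS AND PROOFS =====

-- the value s.split(":", 1)[1] that both programs take
def pvVal (s : String) : String :=
  PySem.List.pyGetD ((PySem.Str.splitMax? s ":" 1).getD []) 1 ""

-- the fold over the filtered list that pvGrab's ofList/map unrolls into
def pvFoldAdd (a : List String) (pre : String) (seq : List String) : List String :=
  (seq.filter (fun s => PySem.Str.startswith s pre)).foldl
    (fun t s => PySem.Set.add t (pvVal s)) a

lemma pvGrab_eq_foldAdd (seq : List String) (pre : String) :
    pvGrab seq pre = pvFoldAdd [] pre seq := by
  unfold pvGrab pvFoldAdd pvVal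
  rw [← PySem.Set.update_nil_left, PySem.Set.update_map_eq_foldl_add]

-- splitOnMax.go after the one allowed split has been used: the remainder closes the result
lemma pvGo_zero (fuel : Nat) (l : List Char) (acc : List (List Char)) :
    PySem.Chars.splitOnMax.go [':'] fuel 0 l [] acc = (l :: acc).reverse := by
  cases fuel with
  | zero => simp [PySem.Chars.splitOnMax.go]
  | succ f => cases l <;> simp [PySem.Chars.splitOnMax.go]

-- splitOnMax.go with maxsplit 1 on a list containing ':' splits at the first ':'
lemma pvGo_one (l : List Char) (fuel : Nat) (cur : List Char) (acc : List (List Char))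
    (hmem : ':' ∈ l) (hfuel : l.length ≤ fuel) :
    PySem.Chars.splitOnMax.go [':'] fuel 1 l cur acc =
      acc.reverse ++ [cur.reverse ++ l.takeWhile (· ≠ ':'),
        l.drop ((l.takeWhile (· ≠ ':')).length + 1)] := by
  induction l generalizing fuel cur acc with
  | nil => simp at hmem
  | cons c rest ih =>
    cases fuel with
    | zero => simp at hfuel
    | succ f =>
      by_cases hc : c = ':'
      · subst hc
        simp only [PySem.Chars.splitOnMax.go, List.isPrefixOf]
        simp [pvGo_zero]
      · have hmem' : ':' ∈ rest := by
          rcases List.mem_cons.mp hmem with h | h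
          · exact absurd h.symm hc
          · exact h
        have hfuel' : rest.length ≤ f := by simpa using hfuel
        have hc' : ':' ≠ c := Ne.symm hc
        simp only [PySem.Chars.splitOnMax.go]
        rw [if_neg (by omega), if_neg (by simp [List.isPrefixOf, hc'])]
        rw [ih f (c :: cur) acc hmem' hfuel']
        simp [hc]

-- s.split(":", 1) on a string containing ':' is exactly [before, after] the first ':'
lemma pvSplit_struct (s : String) (h : ':' ∈ s.toList) :
    PySem.Str.splitMax? s ":" 1 =
      some [String.ofList (s.toList.takeWhile (· ≠ ':')),
            String.ofList (s.toList.drop ((s.toList.takeWhile (· ≠ ':')).length + 1))] := by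
  have hgo := pvGo_one s.toList (s.toList.length + 1) [] [] h (by omega)
  have h1 : PySem.Chars.splitMax? s.toList [':'] 1 =
      some [s.toList.takeWhile (· ≠ ':'),
            s.toList.drop ((s.toList.takeWhile (· ≠ ':')).length + 1)] := by
    simp only [PySem.Chars.splitMax?, PySem.Chars.splitOnMax]
    rw [if_neg (by simp), if_neg (by norm_num)]
    simpa using hgo
  simp only [PySem.Str.splitMax?, show (":".toList = [':']) from rfl, h1]
  simp

-- takeWhile up to the first ':' of a string of the shape pl ++ ':' :: t
lemma pvTw_append (pl t : List Char) (hp : ':' ∉ pl) :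
    ((pl ++ ':' :: t).takeWhile (· ≠ ':')) = pl := by
  induction pl with
  | nil => simp
  | cons x xs ihp =>
    have hx : x ≠ ':' := fun hx => hp (by simp [hx])
    have hxs : ':' ∉ xs := fun hmm => hp (by simp [hmm])
    rw [List.cons_append, List.takeWhile_cons, if_pos (by simp [hx]), ihp hxs]

-- startswith (p ++ ":") characterised by the part before the first ':'
lemma pvStarts_iff (pl : List Char) (cs : List Char) (hp : ':' ∉ pl) :
    (pl ++ [':']) <+: cs ↔ (':' ∈ cs ∧ cs.takeWhile (· ≠ ':') = pl) := by
  constructor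
  · rintro ⟨t, rfl⟩
    refine ⟨by simp, ?_⟩
    simpa using pvTw_append pl t hp
  · rintro ⟨hmem, htw⟩
    have hd : cs.dropWhile (· ≠ ':') ≠ [] := by
      intro hnil
      have hcs : cs = cs.takeWhile (· ≠ ':') := by
        conv_lhs => rw [← List.takeWhile_append_dropWhile (p := (· ≠ ':')) (l := cs)]
        rw [hnil, List.append_nil]
      rw [hcs] at hmem
      have := List.mem_takeWhile_imp hmem
      simp at this
    obtain ⟨c0, tl, hcons⟩ : ∃ c0 tl, cs.dropWhile (· ≠ ':') = c0 :: tl := by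
      cases h : cs.dropWhile (· ≠ ':') with
      | nil => exact absurd h hd
      | cons a b => exact ⟨a, b, rfl⟩
    have hc0 : c0 = ':' := by
      have h2 := List.head_dropWhile_not (· ≠ ':') hd
      simp only [hcons, List.head_cons] at h2
      simpa using h2
    subst hc0
    refine ⟨tl, ?_⟩
    conv_rhs => rw [← List.takeWhile_append_dropWhile (p := (· ≠ ':')) (l := cs)]
    rw [htw, hcons]
    simp

-- one step of A classifies the scope exactly as B's three prefix tests do
lemma pvStepA_eq (st : List String × List String × List String) (s : String) :
    pvStepA st s =
      (if PySem.Str.startswith s "provider:" then PySem.Set.add st.1 (pvVal s) else st.1,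
       if PySem.Str.startswith s "preset:" then PySem.Set.add st.2.1 (pvVal s) else st.2.1,
       if PySem.Str.startswith s "preset_item:" then PySem.Set.add st.2.2 (pvVal s) else st.2.2) := by
  by_cases hmem : ':' ∈ s.toList
  · have hsne : s ≠ "" := by
      intro h; rw [h] at hmem; simp at hmem
    have hIn : PySem.Str.isIn ":" s = true := by
      show PySem.Chars.isIn ":".toList s.toList = true
      rw [show (":".toList = [':']) from rfl, PySem.Chars.isIn_iff_infix]
      rcases List.mem_iff_append.mp hmem with ⟨u, v, huv⟩
      exact ⟨u, v, by rw [huv]; simp⟩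
    have hsplit := pvSplit_struct s hmem
    have hval : pvVal s =
        String.ofList (s.toList.drop ((s.toList.takeWhile (· ≠ ':')).length + 1)) := by
      unfold pvVal
      rw [hsplit]
      simp [PySem.List.pyGetD, PySem.List.pyIdx?, PySem.List.pyGet?]
    have sw : ∀ (pl : List Char) (pre : String), pre.toList = pl ++ [':'] → ':' ∉ pl →
        (PySem.Str.startswith s pre = true ↔ s.toList.takeWhile (· ≠ ':') = pl) := by
      intro pl pre hpre hp
      rw [PySem.Str.startswith_eq, PySem.Chars.startswith_iff, hpre, pvStarts_iff pl s.toList hp]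
      exact ⟨fun h => h.2, fun h => ⟨hmem, h⟩⟩
    have b1 : PySem.Str.startswith s "provider:" =
        decide (s.toList.takeWhile (· ≠ ':') = "provider".toList) :=
      Bool.eq_iff_iff.mpr (by rw [sw "provider".toList "provider:" rfl (by decide)]; simp)
    have b2 : PySem.Str.startswith s "preset:" =
        decide (s.toList.takeWhile (· ≠ ':') = "preset".toList) :=
      Bool.eq_iff_iff.mpr (by rw [sw "preset".toList "preset:" rfl (by decide)]; simp)
    have b3 : PySem.Str.startswith s "preset_item:" =
        decide (s.toList.takeWhile (· ≠ ':') = "preset_item".toList) :=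
      Bool.eq_iff_iff.mpr (by rw [sw "preset_item".toList "preset_item:" rfl (by decide)]; simp)
    have e1 : (String.ofList (s.toList.takeWhile (· ≠ ':')) = "provider") =
        (s.toList.takeWhile (· ≠ ':') = "provider".toList) :=
      propext ⟨fun h => by simpa using congrArg String.toList h,
               fun h => by rw [h, String.ofList_toList]⟩
    have e2 : (String.ofList (s.toList.takeWhile (· ≠ ':')) = "preset") =
        (s.toList.takeWhile (· ≠ ':') = "preset".toList) :=
      propext ⟨fun h => by simpa using congrArg String.toList h,
               fun h => by rw [h, String.ofList_toList]⟩
    have e3 : (String.ofList (s.toList.takeWhile (· ≠ ':')) = "preset_item") =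
        (s.toList.takeWhile (· ≠ ':') = "preset_item".toList) :=
      propext ⟨fun h => by simpa using congrArg String.toList h,
               fun h => by rw [h, String.ofList_toList]⟩
    unfold pvStepA
    rw [hIn]
    rw [if_neg (by simp [hsne])]
    rw [hsplit]
    simp only [Option.getD_some]
    rw [show (PySem.List.pyGetD [String.ofList (s.toList.takeWhile (· ≠ ':')),
          String.ofList (s.toList.drop ((s.toList.takeWhile (· ≠ ':')).length + 1))] 0 "" =
        String.ofList (s.toList.takeWhile (· ≠ ':'))) from by
        simp [PySem.List.pyGetD, PySem.List.pyIdx?, PySem.List.pyGet?]]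
    rw [show (PySem.List.pyGetD [String.ofList (s.toList.takeWhile (· ≠ ':')),
          String.ofList (s.toList.drop ((s.toList.takeWhile (· ≠ ':')).length + 1))] 1 "" =
        String.ofList (s.toList.drop ((s.toList.takeWhile (· ≠ ':')).length + 1))) from by
        simp [PySem.List.pyGetD, PySem.List.pyIdx?, PySem.List.pyGet?]]
    rw [hval, b1, b2, b3]
    simp only [e1, e2, e3]
    split_ifs <;> simp_all
  · have hsw : ∀ (pre : String), ':' ∈ pre.toList → PySem.Str.startswith s pre = false := by
      intro pre hc
      rw [PySem.Str.startswith_eq]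
      refine Bool.eq_false_iff.mpr (fun h => hmem ?_)
      exact ((PySem.Chars.startswith_iff _ _).mp h).subset hc
    have hIn : PySem.Str.isIn ":" s = false := by
      show PySem.Chars.isIn ":".toList s.toList = false
      rw [show (":".toList = [':']) from rfl]
      exact (PySem.Chars.isIn_eq_false_iff _ _).mpr
        (fun hinf => hmem (hinf.subset (by simp)))
    unfold pvStepA
    rw [hIn, hsw "provider:" (by decide), hsw "preset:" (by decide),
        hsw "preset_item:" (by decide)]
    simp

-- filtering a cons, as one conditional fold step
lemma pvFoldAdd_cons (a : List String) (pre : String) (s : String) (rest : List String) :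
    pvFoldAdd a pre (s :: rest) =
      pvFoldAdd (if PySem.Str.startswith s pre then PySem.Set.add a (pvVal s) else a) pre rest := by
  simp only [pvFoldAdd, List.filter_cons]
  split <;> simp_all

-- the main loop invariant: A's fold computes the three filtered folds of B
lemma pvFold_eq (seq : List String) (st : List String × List String × List String) :
    seq.foldl pvStepA st =
      (pvFoldAdd st.1 "provider:" seq, pvFoldAdd st.2.1 "preset:" seq,
       pvFoldAdd st.2.2 "preset_item:" seq) := by
  induction seq generalizing st with
  | nil => simp [pvFoldAdd]
  | cons s rest ih =>
    rw [List.foldl_cons, ih, pvStepA_eq]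
    rw [pvFoldAdd_cons st.1, pvFoldAdd_cons st.2.1, pvFoldAdd_cons st.2.2]

-- ===== VERDICT (by name: the statement is the Claim_ definition above) =====
theorem parse_provider_scopes_py_spec : Claim_equal_parse_provider_scopes_py := by
  intro scopes _
  unfold Spec_parse_provider_scopes_py
  cases scopes with
  | none => simp [parse_provider_scopes_py, parse_provider_scopes_py_alt, pvGrab]
  | some l =>
    by_cases hl : l = []
    · simp [parse_provider_scopes_py, parse_provider_scopes_py_alt, hl, pvGrab]
    · simp only [parse_provider_scopes_py, parse_provider_scopes_py_alt, Option.getD_some]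
      rw [if_neg hl, pvFold_eq, pvGrab_eq_foldAdd, pvGrab_eq_foldAdd, pvGrab_eq_foldAdd]
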